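-- pv_equiv track=rewrite | github.com/WwwwwyDev/crawlist | crawlist/analyzer_util.py | fix_relative_url
-- ===== SOURCE A (Python) =====
-- def fix_relative_url(baseurl: str, relative: str) -> str:
--     # 处理相对路径
--     baseurl = baseurl.strip()
--     relative = relative.strip()
--     if not baseurl.endswith('/'):
--         baseurl += '/'
--     if relative.startswith('/'):
--         relative = relative[1:]
--     elif relative.startswith('../'):
--         while relative.startswith('../'):
--             relative = relative[3:]
--     elif relative.startswith('./'):
--         while relative.startswith('./'):
--             relative = relative[2:]
--     return baseurl + relative
-- ===== SOURCE B (Python) =====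
-- def _strip_reps(s: str, p: str) -> str:
--     # index of the first character breaking the cyclic repetition of p,
--     # then cut at the last complete repetition boundary before it
--     m = len(p)
--     j = next((i for i, c in enumerate(s) if c != p[i % m]), len(s))
--     return s[(j // m) * m:]
--
--
-- def fix_relative_url(baseurl: str, relative: str) -> str:
--     baseurl = baseurl.strip()
--     relative = relative.strip()
--     if not baseurl.endswith('/'):
--         baseurl += '/'
--     if relative.startswith('/'):
--         relative = relative[1:]
--     elif relative.startswith('../'):
--         relative = _strip_reps(relative, '../')
--     elif relative.startswith('./'):
--         relative = _strip_reps(relative, './')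
--     return baseurl + relative
-- ===== Notes on version B (the rewrite author's own statement) =====
-- stated objective: alternative
-- what changed: A strips leading '../' (or './') runs by repeatedly testing startswith and re-slicing the string; B makes a single character scan that finds the first index breaking the cyclic repetition of the prefix and cuts once at the last complete repetition boundary.
import Mathlib
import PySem

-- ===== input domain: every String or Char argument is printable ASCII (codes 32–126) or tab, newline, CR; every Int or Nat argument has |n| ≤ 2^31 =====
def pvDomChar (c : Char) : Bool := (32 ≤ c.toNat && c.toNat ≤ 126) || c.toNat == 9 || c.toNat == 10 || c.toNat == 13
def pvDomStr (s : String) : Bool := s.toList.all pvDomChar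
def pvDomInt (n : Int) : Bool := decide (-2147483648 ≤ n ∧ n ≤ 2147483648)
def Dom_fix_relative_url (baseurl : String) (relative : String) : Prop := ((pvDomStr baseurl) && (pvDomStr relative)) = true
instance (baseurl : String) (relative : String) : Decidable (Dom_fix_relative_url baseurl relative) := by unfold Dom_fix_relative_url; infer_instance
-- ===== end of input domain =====

-- B replaces A's repeated startswith-and-reslice while-loops by a single character
-- scan that finds the first break in the cyclic repetition of the prefix and cuts
-- at the last complete repetition boundary (objective: alternative).


-- ===== PORT A =====
-- while relative.startswith('../'): relative = relative[3:]
def pvWhileUp (s : List Char) : List Char :=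
  if h : PySem.Chars.startswith s ['.', '.', '/'] = true then
    pvWhileUp (PySem.List.slice s (some 3) none)
  else s
termination_by s.length
decreasing_by
  have h3 : 3 ≤ s.length := ((PySem.Chars.startswith_iff s ['.', '.', '/']).mp h).length_le
  rw [PySem.List.slice_from (ha := by norm_num)]
  simp; omega

-- while relative.startswith('./'): relative = relative[2:]
def pvWhileDot (s : List Char) : List Char :=
  if h : PySem.Chars.startswith s ['.', '/'] = true then
    pvWhileDot (PySem.List.slice s (some 2) none)
  else s
termination_by s.length
decreasing_by
  have h2 : 2 ≤ s.length := ((PySem.Chars.startswith_iff s ['.', '/']).mp h).length_le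
  rw [PySem.List.slice_from (ha := by norm_num)]
  simp; omega

def fix_relative_url (baseurl : String) (relative : String) : String :=
  let b0 := PySem.Str.strip baseurl
  let r0 := (PySem.Str.strip relative).toList
  let b1 := if PySem.Str.endswith b0 "/" then b0 else b0 ++ "/"
  let r1 :=
    if PySem.Chars.startswith r0 ['/'] then PySem.List.slice r0 (some 1) none
    else if PySem.Chars.startswith r0 ['.', '.', '/'] then pvWhileUp r0
    else if PySem.Chars.startswith r0 ['.', '/'] then pvWhileDot r0
    else r0
  b1 ++ String.ofList r1

-- ===== PORT B =====
-- j = next((i for i, c in enumerate(s) if c != p[i % m]), len(s))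
def pvFirstMismatch (p : List Char) (s : List Char) (i : Nat) : Nat :=
  match s with
  | [] => i
  | c :: rest => if c ≠ p.getD (i % p.length) ' ' then i else pvFirstMismatch p rest (i + 1)

-- return s[(j // m) * m:]
def pvStripReps (p : List Char) (s : List Char) : List Char :=
  s.drop ((pvFirstMismatch p s 0) / p.length * p.length)

def fix_relative_url_alt (baseurl : String) (relative : String) : String :=
  let b0 := PySem.Str.strip baseurl
  let r0 := (PySem.Str.strip relative).toList
  let b1 := if PySem.Str.endswith b0 "/" then b0 else b0 ++ "/"
  let r1 :=
    if PySem.Chars.startswith r0 ['/'] then PySem.List.slice r0 (some 1) none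
    else if PySem.Chars.startswith r0 ['.', '.', '/'] then pvStripReps ['.', '.', '/'] r0
    else if PySem.Chars.startswith r0 ['.', '/'] then pvStripReps ['.', '/'] r0
    else r0
  b1 ++ String.ofList r1

-- ===== PRECONDITION & SPEC =====
def Spec_fix_relative_url (baseurl : String) (relative : String) (out : String) : Prop := out = fix_relative_url_alt baseurl relative
instance (baseurl : String) (relative : String) (out : String) : Decidable (Spec_fix_relative_url baseurl relative out) := by unfold Spec_fix_relative_url; infer_instance

-- ===== CLAIM (what is proved, stated in full; the proofs are below) =====
def Claim_equal_fix_relative_url : Prop := ∀ (baseurl : String) (relative : String), Dom_fix_relative_url baseurl relative → Spec_fix_relative_url baseurl relative (fix_relative_url baseurl relative)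

-- ===== LEMMAS AND PROOFS =====

theorem fm_le (p s : List Char) (i : Nat) : pvFirstMismatch p s i ≤ i + s.length := by
  induction s generalizing i with
  | nil => simp [pvFirstMismatch]
  | cons c rest ih =>
    rw [pvFirstMismatch]
    split
    · simp
    · have h := ih (i + 1)
      simp only [List.length_cons]
      omega

theorem fm_le_of_mismatch (p s : List Char) (i k : Nat) (hk : k < s.length)
    (hne : s.getD k ' ' ≠ p.getD ((i + k) % p.length) ' ') :
    pvFirstMismatch p s i ≤ i + k := by
  induction s generalizing i k with
  | nil => simp at hk
  | cons c rest ih =>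
    rw [pvFirstMismatch]
    split
    · omega
    · rename_i hmatch
      cases k with
      | zero =>
        simp only [List.getD_cons_zero, Nat.add_zero] at hne
        simp only [ne_eq, not_not] at hmatch
        exact absurd (by simpa using hmatch) hne
      | succ k' =>
        have h := ih (i + 1) k' (by simpa using hk)
          (by simpa [Nat.add_assoc, Nat.add_comm 1 k'] using hne)
        omega

theorem fm_shift (p s : List Char) (i : Nat) :
    pvFirstMismatch p s (i + p.length) = pvFirstMismatch p s i + p.length := by
  induction s generalizing i with
  | nil => simp [pvFirstMismatch]
  | cons c rest ih =>
    simp only [pvFirstMismatch, Nat.add_mod_right]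
    split
    · rfl
    · have h := ih (i + 1)
      rw [show i + p.length + 1 = i + 1 + p.length from by omega, h]

theorem fm_chunk (p t : List Char) (u : List Char) (i : Nat)
    (hu : ∀ k (hk : k < u.length), u.getD k ' ' = p.getD ((i + k) % p.length) ' ') :
    pvFirstMismatch p (u ++ t) i = pvFirstMismatch p t (i + u.length) := by
  induction u generalizing i with
  | nil => simp
  | cons c u' ih =>
    have h0 := hu 0 (by simp)
    simp only [List.cons_append, pvFirstMismatch]
    rw [if_neg (by simpa using h0)]
    have h := ih (i + 1) (fun k hk => by
      have hx := hu (k + 1) (by simpa using Nat.succ_lt_succ hk)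
      simpa [Nat.add_assoc, Nat.add_comm 1 k] using hx)
    rw [h]
    congr 1
    simp only [List.length_cons]
    omega

theorem fm_small_of_not_prefix (p s : List Char) (hp : p ≠ [])
    (h : ¬ p <+: s) : pvFirstMismatch p s 0 < p.length := by
  have hppos : 0 < p.length := List.length_pos_of_ne_nil hp
  by_cases hlen : s.length < p.length
  · have := fm_le p s 0; omega
  · push_neg at hlen
    by_cases hall : ∀ k (hk : k < p.length), s.getD k ' ' = p.getD (k % p.length) ' '
    · exfalso
      apply h
      have htake : s.take p.length = p := by
        apply List.ext_getElem (by simp; omega)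
        intro n h1 h2
        have hn : n < p.length := h2
        have he := hall n hn
        rw [Nat.mod_eq_of_lt hn] at he
        have hns : n < s.length := by omega
        have hgs : s.getD n ' ' = s[n] := by
          simp [List.getD, List.getElem?_eq_getElem hns]
        have hgp : p.getD n ' ' = p[n] := by
          simp [List.getD, List.getElem?_eq_getElem hn]
        rw [hgs, hgp] at he
        simpa [List.getElem_take] using he
      exact htake ▸ List.take_prefix _ _
    · push_neg at hall
      obtain ⟨k, hk, hne⟩ := hall
      have := fm_le_of_mismatch p s 0 k (by omega) (by simpa using hne)
      omega

theorem fm_drop (p t : List Char) (hp : p ≠ []) :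
    pvFirstMismatch p (p ++ t) 0 = pvFirstMismatch p t 0 + p.length := by
  have h1 := fm_chunk p t p 0 (fun k hk => by rw [Nat.zero_add, Nat.mod_eq_of_lt hk])
  have h2 := fm_shift p t 0
  simp only [Nat.zero_add] at h1 h2
  omega

-- A generic "drop the prefix p while it is there" while-loop equals B's one-scan cut.
theorem while_eq_strip (p : List Char) (hp : p ≠ [])
    (W : List Char → List Char)
    (hW : ∀ s, W s = if p <+: s then W (s.drop p.length) else s) :
    ∀ s, W s = pvStripReps p s := by
  intro s
  induction hn : s.length using Nat.strong_induction_on generalizing s with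
  | _ n ih =>
  subst hn
  by_cases h : p <+: s
  · obtain ⟨t, rfl⟩ := h
    have hm : 0 < p.length := List.length_pos_of_ne_nil hp
    rw [hW, if_pos (List.prefix_append p t), List.drop_left]
    have hlt : t.length < (p ++ t).length := by simp; omega
    rw [ih t.length hlt t rfl]
    unfold pvStripReps
    rw [fm_drop p t hp]
    have harith : (pvFirstMismatch p t 0 + p.length) / p.length * p.length
        = p.length + pvFirstMismatch p t 0 / p.length * p.length := by
      rw [Nat.add_div_right _ hm, Nat.add_mul, Nat.one_mul]; omega
    rw [harith]
    have hd : (p ++ t).drop (p.length + pvFirstMismatch p t 0 / p.length * p.length)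
        = ((p ++ t).drop p.length).drop (pvFirstMismatch p t 0 / p.length * p.length) := by
      rw [List.drop_drop, Nat.add_comm]
    rw [hd, List.drop_left]
  · rw [hW, if_neg h]
    unfold pvStripReps
    have := fm_small_of_not_prefix p s hp h
    rw [Nat.div_eq_of_lt this, Nat.zero_mul, List.drop_zero]

theorem pvWhileUp_eq (s : List Char) : pvWhileUp s = pvStripReps ['.', '.', '/'] s := by
  refine while_eq_strip ['.', '.', '/'] (by simp) pvWhileUp (fun t => ?_) s
  rw [pvWhileUp]
  by_cases h : ['.', '.', '/'] <+: t
  · rw [dif_pos ((PySem.Chars.startswith_iff t _).mpr h), if_pos h]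
    congr 1
    rw [PySem.List.slice_from (ha := by norm_num)]
    rfl
  · rw [dif_neg (by simpa [PySem.Chars.startswith_iff] using h), if_neg h]

theorem pvWhileDot_eq (s : List Char) : pvWhileDot s = pvStripReps ['.', '/'] s := by
  refine while_eq_strip ['.', '/'] (by simp) pvWhileDot (fun t => ?_) s
  rw [pvWhileDot]
  by_cases h : ['.', '/'] <+: t
  · rw [dif_pos ((PySem.Chars.startswith_iff t _).mpr h), if_pos h]
    congr 1
    rw [PySem.List.slice_from (ha := by norm_num)]
    rfl
  · rw [dif_neg (by simpa [PySem.Chars.startswith_iff] using h), if_neg h]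

-- ===== VERDICT (by name: the statement is the Claim_ definition above) =====
theorem fix_relative_url_spec : Claim_equal_fix_relative_url := by
  intro baseurl relative _
  unfold Spec_fix_relative_url fix_relative_url fix_relative_url_alt
  simp only [pvWhileUp_eq, pvWhileDot_eq]
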